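-- pv_equiv track=rewrite | github.com/mihail911/wildcard | util/process_commands_breakdown_doc.py | count_action_to_command_type
-- ===== SOURCE A (Python) =====
-- from itertools import product
-- from collections import Counter
--
-- actions_map = { "drop":"drop" , "keep":"drop"
--  , "convo":"convo", "pickup":"pickup" , "rules":"misc" , "meet":"misc" , "move":"misc" , "search":"search" , "misc":"misc" }
--
-- def map_actions(action):
-- 	return actions_map.get(action)
--
-- def get_action_to_command_type_pairing(line):
--
-- 	actions = [ elem.strip() for elem in line[-1].split(";") ]
-- 	command_types = [ elem.strip() for elem in line[-2].split(",") ]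
--
-- 	pairings = None
-- 	if len(actions) == 2 and len(command_types) == 2:
-- 		pairings = [ tup for tup in zip(actions,command_types) ]
-- 	else:
-- 		pairings = [ tup for tup in product(actions,command_types) ]
--
-- 	return pairings
--
-- def count_action_to_command_type(lines):
--
-- 	all_pairings = [ (map_actions(a),ct) for line in lines for a,ct in get_action_to_command_type_pairing(line) ]
--
-- 	action_to_command_type = {}
-- 	for a,ct in all_pairings:
-- 		if a in action_to_command_type:
-- 			action_to_command_type[a].append(ct)
-- 		else:
-- 			action_to_command_type[a] = [ct]
--
-- 	for key in action_to_command_type: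
-- 		action_to_command_type[key] = Counter(action_to_command_type[key])
--
-- 	return action_to_command_type
-- ===== SOURCE B (Python) =====
-- from itertools import product
-- from collections import Counter
--
-- actions_map = { "drop":"drop" , "keep":"drop"
--  , "convo":"convo", "pickup":"pickup" , "rules":"misc" , "meet":"misc" , "move":"misc" , "search":"search" , "misc":"misc" }
--
-- def map_actions(action):
-- 	return actions_map.get(action)
--
-- def get_action_to_command_type_pairing(line):
--
-- 	actions = [ elem.strip() for elem in line[-1].split(";") ]
-- 	command_types = [ elem.strip() for elem in line[-2].split(",") ]
--
-- 	pairings = None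
-- 	if len(actions) == 2 and len(command_types) == 2:
-- 		pairings = [ tup for tup in zip(actions,command_types) ]
-- 	else:
-- 		pairings = [ tup for tup in product(actions,command_types) ]
--
-- 	return pairings
--
-- def count_action_to_command_type(lines):
-- 	# group-by without incremental dict building: list the distinct mapped actions
-- 	# (dict.fromkeys keeps first-occurrence order), then count each action's command
-- 	# types with one filtered Counter per action
-- 	pairs = [ (map_actions(a), ct) for line in lines for a, ct in get_action_to_command_type_pairing(line) ]
-- 	return { act: Counter(ct for a, ct in pairs if a == act)
-- 	         for act in dict.fromkeys(a for a, _ in pairs) }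
-- ===== Notes on version B (the rewrite author's own statement) =====
-- stated objective: alternative
-- what changed: B replaces A's incremental dict grouping (flatten pairs, grow per-action lists in a dict, then convert each list to a Counter) with a distinct-keys-then-filter group-by: it lists the distinct mapped actions once (dict.fromkeys, first-occurrence order) and builds each action's Counter by a separate filtered scan over the pairs.
-- outside the precondition, e.g. on count_action_to_command_type([['look']]): A raises IndexError, B raises IndexError
import Mathlib
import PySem

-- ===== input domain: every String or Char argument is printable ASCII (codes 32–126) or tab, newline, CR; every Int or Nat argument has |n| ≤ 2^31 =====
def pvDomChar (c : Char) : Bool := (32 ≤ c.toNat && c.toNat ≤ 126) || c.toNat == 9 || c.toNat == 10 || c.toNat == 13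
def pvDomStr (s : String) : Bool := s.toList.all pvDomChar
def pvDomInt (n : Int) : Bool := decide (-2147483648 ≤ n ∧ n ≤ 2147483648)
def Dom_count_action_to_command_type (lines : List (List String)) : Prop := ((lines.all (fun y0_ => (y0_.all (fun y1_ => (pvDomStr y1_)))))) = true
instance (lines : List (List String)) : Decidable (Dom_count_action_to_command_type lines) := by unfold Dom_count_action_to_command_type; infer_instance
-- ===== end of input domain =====

-- B groups by listing the distinct mapped actions first and counting each with a filtered scan
-- over the pairs, instead of A's incremental dict-of-lists grouping followed by a Counter pass.

-- ===== PORT A =====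
-- shared module context: actions_map and the two helpers, ported once and used by both ports (as in the Python)
def actionsMap : PySem.Dict String String :=
  PySem.Dict.ofList [("drop","drop"), ("keep","drop"), ("convo","convo"), ("pickup","pickup"),
                     ("rules","misc"), ("meet","misc"), ("move","misc"), ("search","search"), ("misc","misc")]

-- Python returns None for an unmapped action; a None dict key is not a value of the declared
-- String type, so Pre_ guarantees every action is in actions_map and the `.getD ""` arm is unreachable.
def map_actions (action : String) : String := (actionsMap.get? action).getD ""

-- line[-1] / line[-2] raise IndexError for len(line) < 2; Pre_ excludes that, so `.getD ""` is unreachable.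
-- split? is none only for sep = ""; the separators here are the literals ";" and ",", so .getD [] is unreachable
def get_action_to_command_type_pairing (line : List String) : List (String × String) :=
  let actions : List String :=
    ((PySem.Str.split? ((PySem.List.pyGet? line (-1)).getD "") ";").getD []).map (fun e => PySem.Str.strip e)
  let command_types : List String :=
    ((PySem.Str.split? ((PySem.List.pyGet? line (-2)).getD "") ",").getD []).map (fun e => PySem.Str.strip e)
  if actions.length = 2 ∧ command_types.length = 2 then
    actions.zip command_types
  else
    actions.flatMap (fun a => command_types.map (fun c => (a, c)))

def count_action_to_command_type (lines : List (List String)) : List (String × List (String × Int)) :=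
  -- all_pairings = [(map_actions(a), ct) for line in lines for a, ct in pairing(line)], then the grouping
  -- loop, then for key in d: d[key] = Counter(d[key]) (in-place value replacement, order kept); dict returned as items
  (((lines.flatMap (fun line => (get_action_to_command_type_pairing line).map (fun p => (map_actions p.1, p.2)))).foldl
      (fun d p => if d.contains p.1 then d.insert p.1 (d.getD p.1 [] ++ [p.2]) else d.insert p.1 [p.2])
      (PySem.Dict.empty : PySem.Dict String (List String))).items).map
    (fun p => (p.1, (PySem.Dict.counter p.2).items))

-- ===== PORT B =====
-- pairs = [...]; {act: Counter(ct for a, ct in pairs if a == act) for act in dict.fromkeys(a for a, _ in pairs)}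
def count_action_to_command_type_alt (lines : List (List String)) : List (String × List (String × Int)) :=
  let pairs := lines.flatMap (fun line => (get_action_to_command_type_pairing line).map (fun p => (map_actions p.1, p.2)))
  ((PySem.Dict.ofList (pairs.map (fun p => (p.1, (none : Option String))))).keys).map
    (fun act => (act, (PySem.Dict.counter ((pairs.filter (fun p => p.1 == act)).map (fun p => p.2))).items))

-- ===== PRECONDITION & SPEC =====
-- Pre_ excludes exactly the inputs on which the Python A does not return a value of the declared type:
-- a line shorter than 2 (IndexError on line[-1]/line[-2]) and a line whose stripped actions are not all
-- in actions_map (map_actions returns None, giving a dict with a None key).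
def Pre_count_action_to_command_type (lines : List (List String)) : Prop :=
  ∀ line ∈ lines, 2 ≤ line.length ∧
    ∀ a ∈ (((PySem.Str.split? ((PySem.List.pyGet? line (-1)).getD "") ";").getD []).map (fun e => PySem.Str.strip e)),
      actionsMap.contains a = true
instance (lines : List (List String)) : Decidable (Pre_count_action_to_command_type lines) := by
  unfold Pre_count_action_to_command_type; infer_instance

def pvWitness_count_action_to_command_type : List (List String) :=
  [["go", "look, get", "drop ; keep"], ["look", "move"]]

def Spec_count_action_to_command_type (lines : List (List String)) (out : List (String × List (String × Int))) : Prop := out = count_action_to_command_type_alt lines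
instance (lines : List (List String)) (out : List (String × List (String × Int))) : Decidable (Spec_count_action_to_command_type lines out) := by unfold Spec_count_action_to_command_type; infer_instance

-- ===== CLAIM (what is proved, stated in full; the proofs are below) =====
def Claim_equal_count_action_to_command_type : Prop := ∀ (lines : List (List String)), Dom_count_action_to_command_type lines → Pre_count_action_to_command_type lines → Spec_count_action_to_command_type lines (count_action_to_command_type lines)

-- ===== LEMMAS AND PROOFS =====

-- A's grouping step, written as the single modify it performs
theorem pvStepA_eq (d : PySem.Dict String (List String)) (k : String) (ct : String) :
    (if d.contains k then d.insert k (d.getD k [] ++ [ct]) else d.insert k [ct])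
      = d.modify k [] (fun l => l ++ [ct]) := by
  by_cases h : d.contains k = true
  · simp [PySem.Dict.modify, h]
  · have h' : d.contains k = false := by simp_all
    simp [PySem.Dict.modify, h', PySem.Dict.getD_of_not_contains _ _ h']

-- the grouped dict of A, characterised key by key
theorem pvGroup_eq (ps : List (String × String)) :
    (ps.foldl
        (fun d p => if d.contains p.1 then d.insert p.1 (d.getD p.1 [] ++ [p.2]) else d.insert p.1 [p.2])
        (PySem.Dict.empty : PySem.Dict String (List String))).items
      = (PySem.Set.ofList (ps.map Prod.fst)).map
          (fun a => (a, (ps.filter (fun p => p.1 == a)).map Prod.snd)) := by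
  have hstep : (fun (d : PySem.Dict String (List String)) (p : String × String) =>
        if d.contains p.1 then d.insert p.1 (d.getD p.1 [] ++ [p.2]) else d.insert p.1 [p.2])
      = fun d p => d.modify p.1 [] (fun l => l ++ [p.2]) := by
    funext d p; exact pvStepA_eq d p.1 p.2
  rw [hstep]
  have hnd : (ps.foldl (fun d p => d.modify p.1 [] (fun l => l ++ [p.2]))
      (PySem.Dict.empty : PySem.Dict String (List String))).keys.Nodup :=
    PySem.Dict.nodup_keys_foldl_modify_key ps Prod.fst [] (fun _ p => fun l => l ++ [p.2]) _
      (by simp [PySem.Dict.keys_empty])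
  rw [PySem.Dict.items_eq_map_keys _ hnd []]
  rw [PySem.Dict.keys_foldl_modify_key]
  simp only [PySem.Dict.keys_empty, PySem.Set.update_nil_left]
  apply List.map_congr_left
  intro a _
  rw [PySem.Dict.getD_foldl_modify_append]
  simp [PySem.Dict.getD_empty]

-- dict.fromkeys over the pairs' first components has exactly the distinct actions in order
theorem pvFromkeys_keys (ps : List (String × String)) :
    (PySem.Dict.ofList (ps.map (fun p => (p.1, (none : Option String))))).keys
      = PySem.Set.ofList (ps.map Prod.fst) := by
  rw [show (PySem.Dict.ofList (ps.map (fun p => (p.1, (none : Option String)))))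
        = (ps.map (fun p => (p.1, (none : Option String)))).foldl
            (fun d q => d.insert q.1 q.2) PySem.Dict.empty from rfl]
  rw [List.foldl_map]
  rw [PySem.Dict.keys_foldl_insert_key ps Prod.fst]
  simp [PySem.Dict.keys_empty, PySem.Set.update_nil_left]

-- ===== VERDICT (by name: the statement is the Claim_ definition above) =====
theorem count_action_to_command_type_spec : Claim_equal_count_action_to_command_type := by
  intro lines _ _
  unfold Spec_count_action_to_command_type count_action_to_command_type count_action_to_command_type_alt
  simp only [pvGroup_eq, pvFromkeys_keys, List.map_map]
  apply List.map_congr_left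
  intro a _
  simp
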